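-- pv_equiv track=rewrite | github.com/Sumitshukla4020/Spell-Checker-and-Auto-Completion-Using-NLP | spell_checker_and_auto_complete.py | generate_possible_misspellings
-- ===== SOURCE A (Python) =====
-- def generate_possible_misspellings(word):
--     def generate_deletions(word):
--         return [word[:i] + word[i+1:] for i in range(len(word))]
--
--     def generate_insertions(word):
--         letters = 'abcdefghijklmnopqrstuvwxyz'
--         return [word[:i] + c + word[i:] for i in range(len(word) + 1) for c in letters]
--
--     def generate_substitutions(word):
--         letters = 'abcdefghijklmnopqrstuvwxyz'
--         return [word[:i] + c + word[i+1:] for i in range(len(word)) for c in letters if c != word[i]]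
--
--     def generate_transpositions(word):
--         return [word[:i] + word[i+1] + word[i] + word[i+2:] for i in range(len(word) - 1)]
--
--     return set(generate_deletions(word) + generate_insertions(word) +
--                generate_substitutions(word) + generate_transpositions(word))
-- ===== SOURCE B (Python) =====
-- def generate_possible_misspellings(word):
--     letters = 'abcdefghijklmnopqrstuvwxyz'
--     dels, ins, subs, trans = [], [], [], []
--     pre, suf = '', word
--     while suf:
--         x, rest = suf[0], suf[1:]
--         dels.append(pre + rest)
--         ins.extend(pre + c + suf for c in letters)
--         subs.extend(pre + c + rest for c in letters if c != x)
--         if rest: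
--             trans.append(pre + rest[0] + x + rest[1:])
--         pre, suf = pre + x, rest
--     ins.extend(pre + c for c in letters)
--     return set(dels + ins + subs + trans)
-- ===== Notes on version B (the rewrite author's own statement) =====
-- stated objective: alternative
-- what changed: B replaces A's four independent index-range comprehensions (each re-slicing the word at every position) by a single left-to-right sweep that maintains the (prefix, suffix) split incrementally and fills all four edit lists in one pass.
import Mathlib
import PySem

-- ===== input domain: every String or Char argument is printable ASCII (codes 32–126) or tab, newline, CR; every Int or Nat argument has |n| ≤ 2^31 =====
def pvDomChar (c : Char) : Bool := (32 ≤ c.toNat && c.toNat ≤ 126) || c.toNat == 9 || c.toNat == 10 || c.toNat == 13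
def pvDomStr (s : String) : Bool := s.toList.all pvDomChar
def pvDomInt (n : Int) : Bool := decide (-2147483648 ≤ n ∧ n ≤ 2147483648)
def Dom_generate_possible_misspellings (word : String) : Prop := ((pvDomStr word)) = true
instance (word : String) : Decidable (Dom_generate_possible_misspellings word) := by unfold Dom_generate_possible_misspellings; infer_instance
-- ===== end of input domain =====

-- B replaces A's four independent slice-and-index comprehensions by one left-to-right sweep that
-- maintains the (prefix, suffix) split incrementally; objective: alternative decomposition.

def pvLetters : List Char := "abcdefghijklmnopqrstuvwxyz".toList

-- ===== PORT A =====
def generate_possible_misspellings (word : String) : List String :=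
  let w := word.toList
  let n : Int := (w.length : Int)
  let dels := (PySem.List.pyRange 0 n 1).map (fun i =>
      String.ofList (PySem.List.slice w none (some i) ++ PySem.List.slice w (some (i+1)) none))
  let ins := (PySem.List.pyRange 0 (n+1) 1).flatMap (fun i =>
      pvLetters.map (fun c =>
        String.ofList (PySem.List.slice w none (some i) ++ c :: PySem.List.slice w (some i) none)))
  let subs := (PySem.List.pyRange 0 n 1).flatMap (fun i =>
      (pvLetters.filter (fun c => c != PySem.List.pyGetD w i 'a')).map (fun c =>
        String.ofList (PySem.List.slice w none (some i) ++ c :: PySem.List.slice w (some (i+1)) none)))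
  let trans := (PySem.List.pyRange 0 (n-1) 1).map (fun i =>
      String.ofList (PySem.List.slice w none (some i) ++
        PySem.List.pyGetD w (i+1) 'a' :: PySem.List.pyGetD w i 'a' :: PySem.List.slice w (some (i+2)) none))
  PySem.Set.ofList (dels ++ ins ++ subs ++ trans)

-- ===== PORT B =====
def pvSweep (pre suf : List Char) (dels ins subs trans : List String) :
    List String × List String × List String × List String :=
  match suf with
  | [] => (dels, ins ++ pvLetters.map (fun c => String.ofList (pre ++ [c])), subs, trans)
  | x :: rest =>
      pvSweep (pre ++ [x]) rest
        (dels ++ [String.ofList (pre ++ rest)])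
        (ins ++ pvLetters.map (fun c => String.ofList (pre ++ c :: x :: rest)))
        (subs ++ (pvLetters.filter (fun c => c != x)).map (fun c => String.ofList (pre ++ c :: rest)))
        (trans ++ (match rest with
          | [] => []
          | y :: r2 => [String.ofList (pre ++ y :: x :: r2)]))

def generate_possible_misspellings_alt (word : String) : List String :=
  let r := pvSweep [] word.toList [] [] [] []
  PySem.Set.ofList (r.1 ++ r.2.1 ++ r.2.2.1 ++ r.2.2.2)

-- ===== PRECONDITION & SPEC =====
def Spec_generate_possible_misspellings (word : String) (out : List String) : Prop := out = generate_possible_misspellings_alt word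
instance (word : String) (out : List String) : Decidable (Spec_generate_possible_misspellings word out) := by unfold Spec_generate_possible_misspellings; infer_instance

-- ===== CLAIM (what is proved, stated in full; the proofs are below) =====
def Claim_equal_generate_possible_misspellings : Prop := ∀ (word : String), Dom_generate_possible_misspellings word → Spec_generate_possible_misspellings word (generate_possible_misspellings word)

-- ===== LEMMAS AND PROOFS =====

def pvDelsL (pre w : List Char) : List (List Char) :=
  (List.range w.length).map (fun k => pre ++ (w.take k ++ w.drop (k+1)))
def pvInsL (pre w : List Char) : List (List Char) :=
  (List.range (w.length + 1)).flatMap (fun k =>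
    pvLetters.map (fun c => pre ++ (w.take k ++ c :: w.drop k)))
def pvSubsL (pre w : List Char) : List (List Char) :=
  (List.range w.length).flatMap (fun k =>
    (pvLetters.filter (fun c => c != w.getD k 'a')).map (fun c =>
      pre ++ (w.take k ++ c :: w.drop (k+1))))
def pvTransL (pre w : List Char) : List (List Char) :=
  (List.range (w.length - 1)).map (fun k =>
    pre ++ (w.take k ++ w.getD (k+1) 'a' :: w.getD k 'a' :: w.drop (k+2)))

lemma pvDelsL_cons (pre : List Char) (x : Char) (rest : List Char) :
    pvDelsL pre (x :: rest) = (pre ++ rest) :: pvDelsL (pre ++ [x]) rest := by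
  simp [pvDelsL, List.range_succ_eq_map, List.map_map, Function.comp_def]

lemma pvInsL_cons (pre : List Char) (x : Char) (rest : List Char) :
    pvInsL pre (x :: rest) =
      pvLetters.map (fun c => pre ++ c :: x :: rest) ++ pvInsL (pre ++ [x]) rest := by
  simp [pvInsL, List.range_succ_eq_map, List.flatMap_map, Function.comp_def]

lemma pvSubsL_cons (pre : List Char) (x : Char) (rest : List Char) :
    pvSubsL pre (x :: rest) =
      (pvLetters.filter (fun c => c != x)).map (fun c => pre ++ c :: rest) ++
        pvSubsL (pre ++ [x]) rest := by
  simp [pvSubsL, List.range_succ_eq_map, List.flatMap_map, Function.comp_def]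

lemma pvTransL_cons (pre : List Char) (x : Char) (rest : List Char) :
    pvTransL pre (x :: rest) =
      (match rest with
        | [] => ([] : List (List Char))
        | y :: r2 => [pre ++ y :: x :: r2]) ++ pvTransL (pre ++ [x]) rest := by
  cases rest with
  | nil => simp [pvTransL]
  | cons y r2 =>
      simp [pvTransL, List.range_succ_eq_map, List.map_map, Function.comp_def]

lemma pvSweep_eq (w : List Char) : ∀ (pre : List Char) (d i s t : List String),
    pvSweep pre w d i s t =
      (d ++ (pvDelsL pre w).map String.ofList, i ++ (pvInsL pre w).map String.ofList,
       s ++ (pvSubsL pre w).map String.ofList, t ++ (pvTransL pre w).map String.ofList) := by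
  induction w with
  | nil =>
      intro pre d i s t
      simp [pvSweep, pvDelsL, pvInsL, pvSubsL, pvTransL]
  | cons x rest ih =>
      intro pre d i s t
      rw [pvSweep.eq_def]; simp only []; rw [ih, pvDelsL_cons, pvInsL_cons, pvSubsL_cons, pvTransL_cons]
      cases rest with
      | nil => simp [List.append_assoc, List.map_map, Function.comp_def]
      | cons y r2 => simp [List.append_assoc, List.map_map, Function.comp_def]

lemma pvA_dels (w : List Char) :
    (PySem.List.pyRange 0 (w.length : Int) 1).map (fun i =>
        String.ofList (PySem.List.slice w none (some i) ++ PySem.List.slice w (some (i+1)) none)) =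
      (pvDelsL [] w).map String.ofList := by
  rw [PySem.List.pyRange_one]
  simp only [sub_zero, Int.toNat_natCast, List.map_map, pvDelsL]
  apply List.map_congr_left
  intro k _
  have h1 : ((0 : Int) + (k : Int)) = ((k : Nat) : Int) := by push_cast; ring
  have h2 : ((k : Int) + 1) = (((k + 1 : Nat)) : Int) := by push_cast; ring
  simp only [Function.comp_def, h1, h2, PySem.List.slice_to_natCast,
    PySem.List.slice_from_natCast, List.nil_append]

lemma pvA_ins (w : List Char) :
    (PySem.List.pyRange 0 ((w.length : Int) + 1) 1).flatMap (fun i =>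
        pvLetters.map (fun c =>
          String.ofList (PySem.List.slice w none (some i) ++ c :: PySem.List.slice w (some i) none))) =
      (pvInsL [] w).map String.ofList := by
  rw [PySem.List.pyRange_one]
  have hn : (((w.length : Int) + 1) - 0).toNat = w.length + 1 := by omega
  rw [hn, List.flatMap_map]
  simp only [pvInsL, List.map_flatMap]
  apply List.flatMap_congr
  intro k _
  have h1 : ((0 : Int) + (k : Int)) = ((k : Nat) : Int) := by push_cast; ring
  simp only [Function.comp_def, h1, PySem.List.slice_to_natCast,
    PySem.List.slice_from_natCast, List.map_map, List.nil_append]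

lemma pvA_subs (w : List Char) :
    (PySem.List.pyRange 0 (w.length : Int) 1).flatMap (fun i =>
        (pvLetters.filter (fun c => c != PySem.List.pyGetD w i 'a')).map (fun c =>
          String.ofList (PySem.List.slice w none (some i) ++ c :: PySem.List.slice w (some (i+1)) none))) =
      (pvSubsL [] w).map String.ofList := by
  rw [PySem.List.pyRange_one]
  simp only [sub_zero, Int.toNat_natCast, List.flatMap_map]
  simp only [pvSubsL, List.map_flatMap]
  apply List.flatMap_congr
  intro k _
  have h1 : ((0 : Int) + (k : Int)) = ((k : Nat) : Int) := by push_cast; ring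
  have h2 : ((k : Int) + 1) = (((k + 1 : Nat)) : Int) := by push_cast; ring
  simp only [Function.comp_def, h1, h2, PySem.List.slice_to_natCast,
    PySem.List.slice_from_natCast, PySem.List.pyGetD_natCast, List.map_map, List.nil_append]

lemma pvA_trans (w : List Char) :
    (PySem.List.pyRange 0 ((w.length : Int) - 1) 1).map (fun i =>
        String.ofList (PySem.List.slice w none (some i) ++
          PySem.List.pyGetD w (i+1) 'a' :: PySem.List.pyGetD w i 'a' :: PySem.List.slice w (some (i+2)) none)) =
      (pvTransL [] w).map String.ofList := by
  rw [PySem.List.pyRange_one]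
  have hn : (((w.length : Int) - 1) - 0).toNat = w.length - 1 := by omega
  rw [hn]
  simp only [pvTransL, List.map_map]
  apply List.map_congr_left
  intro k _
  have h1 : ((0 : Int) + (k : Int)) = ((k : Nat) : Int) := by push_cast; ring
  have h2 : ((k : Int) + 1) = (((k + 1 : Nat)) : Int) := by push_cast; ring
  have h3 : ((k : Int) + 2) = (((k + 2 : Nat)) : Int) := by push_cast; ring
  simp only [Function.comp_def, h1, h2, h3, PySem.List.slice_to_natCast,
    PySem.List.slice_from_natCast, PySem.List.pyGetD_natCast, List.nil_append]

-- ===== VERDICT (by name: the statement is the Claim_ definition above) =====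
theorem generate_possible_misspellings_spec : Claim_equal_generate_possible_misspellings := by
  intro word _
  unfold Spec_generate_possible_misspellings
  unfold generate_possible_misspellings generate_possible_misspellings_alt
  rw [pvSweep_eq]
  simp only [List.nil_append]
  rw [pvA_dels, pvA_ins, pvA_subs, pvA_trans]
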